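-- pv_equiv track=rewrite | github.com/daniel-reich/ubiquitous-fiesta | PirFJDfGk4vpsdkeE_11.py | help_bobby
-- ===== SOURCE A (Python) =====
-- def help_bobby(size):
--     l = []
--     l2 = []
--     t = 1
--     for i in range(size):
--         for j in range(size):
--            l.append(t)
--            t += 1
--         l2.append(l)
--         l = []
--     s = size
--     for i in range(size):
--         l2[i][i] = 1
--         l2[i][s-1] = 1
--         s-=1
--         for j in range(len(l2[i])):
--             if l2[i][j] !=1:
--                 l2[i][j] = 0
--     return l2
-- ===== SOURCE B (Python) =====
-- def help_bobby(size):
--     return [[1 if j == i or j == size - 1 - i else 0 for j in range(size)]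
--             for i in range(size)]
-- ===== Notes on version B (the rewrite author's own statement) =====
-- stated objective: simpler
-- what changed: A fills the matrix with sequential counter values, then mutates it in a second pass (setting the two diagonal cells of each row to 1 and scanning every cell to zero out non-1 values); B builds each cell directly from its coordinates with a single nested comprehension (1 iff j==i or j==size-1-i, else 0), with no mutation and no counter.
import Mathlib
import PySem

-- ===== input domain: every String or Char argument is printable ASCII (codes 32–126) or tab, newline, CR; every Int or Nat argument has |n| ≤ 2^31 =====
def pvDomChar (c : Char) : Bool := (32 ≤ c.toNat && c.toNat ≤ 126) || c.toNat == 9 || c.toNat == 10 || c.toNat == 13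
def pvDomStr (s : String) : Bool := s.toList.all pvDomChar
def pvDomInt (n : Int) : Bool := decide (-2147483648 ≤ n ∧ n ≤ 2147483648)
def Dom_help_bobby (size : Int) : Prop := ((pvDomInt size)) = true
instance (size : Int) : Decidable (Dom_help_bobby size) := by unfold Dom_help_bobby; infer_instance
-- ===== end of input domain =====

-- B replaces A's sequential fill + in-place rewrite passes by directly computing each cell
-- from its coordinates (1 on the two diagonals, 0 elsewhere) in a single comprehension.

-- ===== PORT A =====
def help_bobby (size : Int) : List (List Int) :=
  -- first nested loop: sequential fill of l2 with counter t starting at 1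
  let fill := (PySem.List.pyRange 0 size 1).foldl
    (fun (st : List (List Int) × Int) _i =>
      let inner := (PySem.List.pyRange 0 size 1).foldl
        (fun (st2 : List Int × Int) _j => (st2.1 ++ [st2.2], st2.2 + 1)) ([], st.2)
      (st.1 ++ [inner.1], inner.2))
    ([], 1)
  -- second loop: set l2[i][i], l2[i][s-1] to 1, decrement s, zero out the rest of the row
  -- (indices i and s-1 are nonnegative and in range for every i in range(size), so List.set
  --  with .toNat is exact for Python's in-place assignment here)
  let pass := (PySem.List.pyRange 0 size 1).foldl
    (fun (st : List (List Int) × Int) i =>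
      let row := PySem.List.pyGetD st.1 i []
      let row := row.set i.toNat 1
      let row := row.set (st.2 - 1).toNat 1
      let row := (PySem.List.pyRange 0 (row.length : Int) 1).foldl
        (fun (r : List Int) j => if PySem.List.pyGetD r j 0 ≠ 1 then r.set j.toNat 0 else r) row
      (st.1.set i.toNat row, st.2 - 1))
    (fill.1, size)
  pass.1

-- ===== PORT B =====
def help_bobby_alt (size : Int) : List (List Int) :=
  (PySem.List.pyRange 0 size 1).map (fun i =>
    (PySem.List.pyRange 0 size 1).map (fun j =>
      if j = i ∨ j = size - 1 - i then 1 else 0))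


-- ===== PRECONDITION & SPEC =====
def Spec_help_bobby (size : Int) (out : List (List Int)) : Prop := out = help_bobby_alt size
instance (size : Int) (out : List (List Int)) : Decidable (Spec_help_bobby size out) := by unfold Spec_help_bobby; infer_instance

-- ===== CLAIM (what is proved, stated in full; the proofs are below) =====
def Claim_equal_help_bobby : Prop := ∀ (size : Int), Dom_help_bobby size → Spec_help_bobby size (help_bobby size)

-- ===== LEMMAS AND PROOFS =====
-- L1: inner fill
theorem fill_inner (L : List Int) : ∀ (acc : List Int) (t : Int),
    L.foldl (fun (st2 : List Int × Int) _ => (st2.1 ++ [st2.2], st2.2 + 1)) (acc, t)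
    = (acc ++ (List.range L.length).map (fun j : Nat => t + (j : Int)), t + L.length) := by
  induction L with
  | nil => intro acc t; simp
  | cons x L ih =>
    intro acc t
    simp only [List.foldl_cons, ih, Prod.mk.injEq, List.length_cons]
    refine ⟨?_, by push_cast; ring⟩
    rw [List.range_succ_eq_map, List.map_cons, List.map_map, List.append_assoc]
    simp only [Nat.cast_zero, add_zero, List.singleton_append]
    congr 2
    apply List.map_congr_left; intro a _; simp [Function.comp, Nat.succ_eq_add_one]; ring

-- L2a: clean outer fill
theorem fill_outer_clean (n : Nat) (L : List Int) : ∀ (acc : List (List Int)) (t : Int),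
    L.foldl (fun (st : List (List Int) × Int) _ =>
        (st.1 ++ [(List.range n).map (fun j : Nat => st.2 + (j : Int))], st.2 + n)) (acc, t)
    = (acc ++ (List.range L.length).map (fun i : Nat =>
        (List.range n).map (fun j : Nat => t + (i : Int) * n + (j : Int))),
       t + L.length * n) := by
  induction L with
  | nil => intro acc t; simp
  | cons x L ih =>
    intro acc t
    simp only [List.foldl_cons, ih, Prod.mk.injEq, List.length_cons]
    refine ⟨?_, by push_cast; ring⟩
    rw [List.range_succ_eq_map, List.map_cons, List.map_map, List.append_assoc]
    simp only [Nat.cast_zero, zero_mul, add_zero, List.singleton_append]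
    congr 2
    apply List.map_congr_left; intro a _
    simp only [Function.comp, Nat.succ_eq_add_one]
    apply List.map_congr_left; intro b _
    push_cast; ring

-- L2: outer fill, port shape
theorem fill_outer (R : List Int) (L : List Int) (acc : List (List Int)) (t : Int) :
    L.foldl (fun (st : List (List Int) × Int) _ =>
        (st.1 ++ [(R.foldl (fun (st2 : List Int × Int) _ => (st2.1 ++ [st2.2], st2.2 + 1)) ([], st.2)).1],
         (R.foldl (fun (st2 : List Int × Int) _ => (st2.1 ++ [st2.2], st2.2 + 1)) ([], st.2)).2)) (acc, t)
    = (acc ++ (List.range L.length).map (fun i : Nat =>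
        (List.range R.length).map (fun j : Nat => t + (i : Int) * R.length + (j : Int))),
       t + L.length * R.length) := by
  have hbody : (fun (st : List (List Int) × Int) (_ : Int) =>
        (st.1 ++ [(R.foldl (fun (st2 : List Int × Int) _ => (st2.1 ++ [st2.2], st2.2 + 1)) ([], st.2)).1],
         (R.foldl (fun (st2 : List Int × Int) _ => (st2.1 ++ [st2.2], st2.2 + 1)) ([], st.2)).2))
      = (fun (st : List (List Int) × Int) _ =>
        (st.1 ++ [(List.range R.length).map (fun j : Nat => st.2 + (j : Int))], st.2 + R.length)) := by
    funext st y; rw [fill_inner]; simp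
  rw [hbody, fill_outer_clean]

-- L3: zeroing pass over one row
theorem zero_pass (k : Nat) : ∀ (a : Int) (r : List Int), 0 ≤ a → a + k = r.length →
    (PySem.List.pyRange a (r.length : Int) 1).foldl
      (fun (r : List Int) j => if PySem.List.pyGetD r j 0 ≠ 1 then r.set j.toNat 0 else r) r
    = r.mapIdx (fun j x => if a ≤ (j : Int) ∧ x ≠ 1 then 0 else x) := by
  induction k with
  | zero =>
    intro a r ha hlen
    rw [PySem.List.pyRange_one_eq_nil (by omega)]
    simp only [List.foldl_nil]
    apply List.ext_getElem (by simp)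
    intro j h1 h2
    rw [List.getElem_mapIdx, if_neg (by omega)]
  | succ k ih =>
    intro a r ha hlen
    have hain : a.toNat < r.length := by omega
    rw [PySem.List.pyRange_one_cons (by push_cast; omega), List.foldl_cons]
    have hget : PySem.List.pyGetD r a 0 = r[a.toNat]'hain := by
      rw [PySem.List.pyGetD_eq_getElem r 0 ha (by push_cast; omega)]
    rw [hget]
    by_cases hc : r[a.toNat]'hain = 1
    · rw [if_neg (by simp [hc])]
      rw [ih (a+1) r (by omega) (by omega)]
      apply List.ext_getElem (by simp)
      intro j h1 h2
      rw [List.getElem_mapIdx, List.getElem_mapIdx]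
      simp only [List.length_mapIdx] at h1 h2
      by_cases hja : j = a.toNat
      · subst hja
        rw [if_neg (by omega), if_neg (by simp [hc])]
      · by_cases hx : (a + 1 ≤ (j : Int) ∧ r[j]'h1 ≠ 1)
        · rw [if_pos hx, if_pos ⟨by omega, hx.2⟩]
        · rw [if_neg hx, if_neg (by rintro ⟨hj, hv⟩; exact hx ⟨by omega, hv⟩)]
    · rw [if_pos (by simp [hc])]
      have hlenset : ((r.set a.toNat 0).length : Int) = (r.length : Int) := by simp
      rw [show (r.length : Int) = ((r.set a.toNat 0).length : Int) from hlenset.symm,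
          ih (a+1) (r.set a.toNat 0) (by omega) (by simp; omega)]
      apply List.ext_getElem (by simp)
      intro j h1 h2
      rw [List.getElem_mapIdx, List.getElem_mapIdx]
      simp only [List.length_mapIdx, List.length_set] at h1 h2
      by_cases hja : j = a.toNat
      · subst hja
        rw [if_neg (by omega), if_pos ⟨by omega, hc⟩, List.getElem_set_self]
      · have hne : (r.set a.toNat 0)[j]'(by simpa using h1) = r[j]'h2 :=
          List.getElem_set_ne (by omega) _
        rw [hne]
        by_cases hx : (a + 1 ≤ (j : Int) ∧ r[j]'h2 ≠ 1)
        · rw [if_pos hx, if_pos ⟨by omega, hx.2⟩]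
        · rw [if_neg hx, if_neg (by rintro ⟨hj, hv⟩; exact hx ⟨by omega, hv⟩)]

def passRow (size i : Int) (r : List Int) : List Int :=
  (PySem.List.pyRange 0 (((r.set i.toNat 1).set (size - 1 - i).toNat 1).length : Int) 1).foldl
    (fun (r : List Int) j => if PySem.List.pyGetD r j 0 ≠ 1 then r.set j.toNat 0 else r)
    ((r.set i.toNat 1).set (size - 1 - i).toNat 1)

theorem pass_outer (size : Int) (k : Nat) : ∀ (a : Int) (l2 : List (List Int)),
    0 ≤ a → a + k = size → l2.length = size.toNat →
    (PySem.List.pyRange a size 1).foldl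
      (fun (st : List (List Int) × Int) i =>
        (st.1.set i.toNat
          ((PySem.List.pyRange 0 ((((PySem.List.pyGetD st.1 i []).set i.toNat 1).set (st.2 - 1).toNat 1).length : Int) 1).foldl
            (fun (r : List Int) j => if PySem.List.pyGetD r j 0 ≠ 1 then r.set j.toNat 0 else r)
            (((PySem.List.pyGetD st.1 i []).set i.toNat 1).set (st.2 - 1).toNat 1)),
         st.2 - 1))
      (l2, size - a)
    = (l2.mapIdx (fun i r => if a ≤ (i : Int) then passRow size (i : Int) r else r), 0) := by
  induction k with
  | zero =>
    intro a l2 ha hk hlen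
    rw [PySem.List.pyRange_one_eq_nil (by omega)]
    simp only [List.foldl_nil, Prod.mk.injEq]
    refine ⟨?_, by omega⟩
    apply List.ext_getElem (by simp)
    intro j h1 h2
    rw [List.getElem_mapIdx, if_neg (by omega)]
  | succ k ih =>
    intro a l2 ha hk hlen
    have hain : a.toNat < l2.length := by omega
    rw [PySem.List.pyRange_one_cons (by omega), List.foldl_cons]
    have hget : PySem.List.pyGetD l2 a [] = l2[a.toNat]'hain := by
      rw [PySem.List.pyGetD_eq_getElem l2 [] ha (by push_cast; omega)]
    simp only [hget]
    have harith : size - a - 1 = size - 1 - a := by ring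
    have hrow : ((PySem.List.pyRange 0 (((l2[a.toNat]'hain).set a.toNat 1).set (size - a - 1).toNat 1).length 1).foldl
            (fun (r : List Int) j => if PySem.List.pyGetD r j 0 ≠ 1 then r.set j.toNat 0 else r)
            (((l2[a.toNat]'hain).set a.toNat 1).set (size - a - 1).toNat 1))
        = passRow size a (l2[a.toNat]'hain) := by
      rw [passRow, harith]
    rw [show size - a - 1 = size - (a + 1) by ring]
    rw [ih (a + 1) _ (by omega) (by omega) (by simpa using hlen)]
    refine Prod.ext ?_ rfl
    apply List.ext_getElem (by simp)
    intro j h1 h2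
    rw [List.getElem_mapIdx, List.getElem_mapIdx]
    simp only [List.length_mapIdx, List.length_set] at h1 h2
    by_cases hja : j = a.toNat
    · subst hja
      rw [if_neg (by omega), if_pos (by omega), List.getElem_set_self]
      rw [show ((a.toNat : Nat) : Int) = a from Int.toNat_of_nonneg ha]
      rw [← hrow]
      rw [show size - (a + 1) = size - a - 1 by ring]
    · rw [List.getElem_set_ne (by omega) _]
      by_cases hx : a + 1 ≤ (j : Int)
      · rw [if_pos hx, if_pos (by omega)]
      · rw [if_neg hx, if_neg (by omega)]

theorem passRow_eq (size i : Int) (r : List Int) (hlen : ((r.set i.toNat 1).set (size - 1 - i).toNat 1).length = r.length) :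
    passRow size i r
    = ((r.set i.toNat 1).set (size - 1 - i).toNat 1).mapIdx (fun j x => if 0 ≤ (j : Int) ∧ x ≠ 1 then 0 else x) := by
  rw [passRow, zero_pass ((r.set i.toNat 1).set (size - 1 - i).toNat 1).length 0 _ le_rfl (by omega)]

theorem help_bobby_eq_alt (size : Int) : help_bobby size = help_bobby_alt size := by
  by_cases hle : size ≤ 0
  · simp [help_bobby, help_bobby_alt, PySem.List.pyRange_one_eq_nil hle]
  · have hpos : 0 < size := by omega
    obtain ⟨n, rfl⟩ : ∃ n : Nat, size = (n : Int) := ⟨size.toNat, (Int.toNat_of_nonneg hpos.le).symm⟩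
    have hn : 0 < n := by exact_mod_cast hpos
    simp only [help_bobby, help_bobby_alt]
    rw [fill_outer (PySem.List.pyRange 0 (n : Int) 1) (PySem.List.pyRange 0 (n : Int) 1) [] 1]
    simp only [List.nil_append, PySem.List.length_pyRange_one, sub_zero, Int.toNat_natCast]
    set l2 : List (List Int) := (List.range n).map (fun i : Nat =>
      (List.range n).map (fun j : Nat => 1 + (i : Int) * (n : Int) + (j : Int))) with hl2
    have hlenl2 : l2.length = ((n : Int)).toNat := by simp [hl2]
    have hp := pass_outer (n : Int) n 0 l2 le_rfl (by omega) hlenl2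
    simp only [sub_zero] at hp
    rw [hp]
    rw [PySem.List.pyRange_zero_natCast n, List.map_map]
    apply List.ext_getElem (by simp [hl2])
    intro i hi1 hi2
    simp only [List.length_mapIdx, List.length_map, List.length_range, hl2] at hi1 hi2
    rw [List.getElem_mapIdx, if_pos (by omega)]
    simp only [hl2, List.getElem_map, List.getElem_range, List.map_map, Function.comp]
    set row : List Int := (List.range n).map (fun j : Nat => 1 + (i : Int) * (n : Int) + (j : Int)) with hrow
    have hrl : row.length = n := by simp [hrow]
    rw [passRow_eq _ _ _ (by simp)]
    apply List.ext_getElem (by simp [hrl])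
    intro j hj1 hj2
    simp only [List.length_mapIdx, List.length_set, List.length_map, List.length_range, hrl] at hj1 hj2
    rw [List.getElem_mapIdx, List.getElem_map, List.getElem_range]
    simp only [List.getElem_set, Function.comp, Int.toNat_natCast, hrow,
               List.getElem_map, List.getElem_range]
    by_cases h1 : ((n : Int) - 1 - (i : Int)).toNat = j
    · have hj : ((j : Nat) : Int) = (n : Int) - 1 - (i : Int) := by omega
      simp [h1, hj]
    · by_cases h2 : i = j
      · subst h2
        simp [h1]
      · rw [if_neg h1, if_neg h2]
        have hne1 : (1 + (i : Int) * (n : Int) + (j : Int)) ≠ 1 := by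
          intro h
          have h' : (i : Int) * (n : Int) + (j : Int) = 0 := by omega
          have h0 : i * n + j = 0 := by exact_mod_cast h'
          rcases Nat.add_eq_zero.mp h0 with ⟨hmn, hj0⟩
          rcases Nat.mul_eq_zero.mp hmn with hi0 | hn0
          · exact h2 (by omega)
          · omega
        rw [if_pos ⟨by omega, hne1⟩, if_neg (by push_neg; exact ⟨by omega, by omega⟩)]

-- ===== VERDICT (by name: the statement is the Claim_ definition above) =====
theorem help_bobby_spec : Claim_equal_help_bobby := by
  intro size _
  unfold Spec_help_bobby
  exact help_bobby_eq_alt size
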